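-- pv_equiv track=rewrite | github.com/E26-41/lab | lab_3/easy/1-4.py | first_min
-- ===== SOURCE A (Python) =====
-- def first_min(arr):
--     min_f = None
--     min_index = -1
--     for index, x in enumerate(arr):
--         if x % 2 == 0:
--             if min_f is None or x < min_f:
--                 min_f = x
--                 min_index = index
--     return min_f, min_index
-- ===== SOURCE B (Python) =====
-- def first_min(arr):
--     evens = [(x, i) for i, x in enumerate(arr) if x % 2 == 0]
--     if not evens:
--         return None, -1
--     v, i = min(evens)
--     return v, i
-- ===== Notes on version B (the rewrite author's own statement) =====
-- stated objective: simpler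
-- what changed: Replaces A's fused scan that tracks a running (min, index) state with a filter-then-reduce decomposition: a comprehension collects (value, index) pairs of the even elements and min over tuples picks the smallest value with the earliest index.
import Mathlib
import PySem

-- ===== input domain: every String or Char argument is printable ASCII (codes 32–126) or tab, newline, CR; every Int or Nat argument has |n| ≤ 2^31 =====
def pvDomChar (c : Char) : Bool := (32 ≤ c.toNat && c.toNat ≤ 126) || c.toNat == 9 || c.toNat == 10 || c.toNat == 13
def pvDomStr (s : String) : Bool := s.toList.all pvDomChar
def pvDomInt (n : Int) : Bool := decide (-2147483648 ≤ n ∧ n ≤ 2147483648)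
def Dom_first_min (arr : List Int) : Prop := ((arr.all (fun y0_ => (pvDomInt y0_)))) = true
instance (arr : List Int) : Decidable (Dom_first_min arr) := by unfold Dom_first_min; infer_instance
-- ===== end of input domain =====

-- B replaces A's fused scan-and-track loop with a filter-then-reduce decomposition (simpler, same cost).

-- ===== PORT A =====
-- literal port of A's single loop over enumerate(arr) carrying the state (min_f, min_index)
def first_min (arr : List Int) : Option Int × Int :=
  (PySem.List.enumerate arr).foldl
    (fun st p =>
      if PySem.Int.mod p.2 2 == 0 then
        match st.1 with
        | none => (some p.2, p.1)
        | some m => if p.2 < m then (some p.2, p.1) else st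
      else st)
    (none, -1)

-- ===== PORT B =====
-- port of B: comprehension collecting (value, index) pairs of the evens, then min over tuples
def first_min_alt (arr : List Int) : Option Int × Int :=
  let evens := (PySem.List.enumerate arr).filterMap
    (fun p => if PySem.Int.mod p.2 2 == 0 then some (p.2, p.1) else none)
  match PySem.List.min2? evens (fun q => q.1) (fun q => q.2) with
  | none => (none, -1)
  | some (v, i) => (some v, i)

-- ===== PRECONDITION & SPEC =====
def Spec_first_min (arr : List Int) (out : Option Int × Int) : Prop := out = first_min_alt arr
instance (arr : List Int) (out : Option Int × Int) : Decidable (Spec_first_min arr out) := by unfold Spec_first_min; infer_instance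

-- ===== CLAIM (what is proved, stated in full; the proofs are below) =====
def Claim_equal_first_min : Prop := ∀ (arr : List Int), Dom_first_min arr → Spec_first_min arr (first_min arr)

-- ===== LEMMAS AND PROOFS =====

def pvStepA (st : Option Int × Int) (p : Int × Int) : Option Int × Int :=
  if PySem.Int.mod p.2 2 == 0 then
    match st.1 with
    | none => (some p.2, p.1)
    | some m => if p.2 < m then (some p.2, p.1) else st
  else st

def pvStepB (acc : Option (Int × Int)) (q : Int × Int) : Option (Int × Int) :=
  match acc with
  | none => some q
  | some m =>
    if (decide (q.1 < m.1) || !decide (m.1 < q.1) && decide (q.2 < m.2)) = true then some q else some m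

def pvOut (acc : Option (Int × Int)) : Option Int × Int :=
  match acc with
  | none => (none, -1)
  | some (v, i) => (some v, i)

lemma pv_loop_eq : ∀ (l : List (Int × Int)) (acc : Option (Int × Int)),
    l.Pairwise (fun p q => p.1 < q.1) →
    (∀ p ∈ l, ∀ v j, acc = some (v, j) → j < p.1) →
    l.foldl pvStepA (pvOut acc)
      = pvOut ((l.filterMap
          (fun p => if PySem.Int.mod p.2 2 == 0 then some (p.2, p.1) else none)).foldl pvStepB acc) := by
  intro l
  induction l with
  | nil => intro acc _ _; rfl
  | cons p t ih =>
    intro acc hpw hlt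
    rcases p with ⟨i, x⟩
    rw [List.pairwise_cons] at hpw
    simp only [List.foldl_cons, List.filterMap_cons]
    by_cases hx : PySem.Int.mod x 2 == 0
    · rw [if_pos hx, List.foldl_cons]
      cases acc with
      | none =>
        have h1 : pvStepA (pvOut none) (i, x) = pvOut (some (x, i)) := by
          simp only [pvStepA, pvOut]; rw [if_pos hx]
        have h2 : pvStepB none (x, i) = some (x, i) := rfl
        rw [h1, h2]
        exact ih (some (x, i)) hpw.2 (by
          intro q hq v j hvj
          cases hvj
          exact hpw.1 q hq)
      | some m =>
        rcases m with ⟨v, j⟩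
        have hji : j < i := hlt (i, x) (by simp) v j rfl
        by_cases hvx : x < v
        · have h1 : pvStepA (pvOut (some (v, j))) (i, x) = pvOut (some (x, i)) := by
            simp only [pvStepA, pvOut]; rw [if_pos hx, if_pos hvx]
          have h2 : pvStepB (some (v, j)) (x, i) = some (x, i) := by
            simp [pvStepB, hvx]
          rw [h1, h2]
          exact ih (some (x, i)) hpw.2 (by
            intro q hq w k hwk
            cases hwk
            exact hpw.1 q hq)
        · have h1 : pvStepA (pvOut (some (v, j))) (i, x) = pvOut (some (v, j)) := by
            simp only [pvStepA, pvOut]; rw [if_pos hx, if_neg hvx]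
          have h2 : pvStepB (some (v, j)) (x, i) = some (v, j) := by
            simp only [pvStepB]
            rw [if_neg]
            simp only [Bool.or_eq_true, Bool.and_eq_true, decide_eq_true_eq,
              Bool.not_eq_true', decide_eq_false_iff_not]
            rintro (h | ⟨h1', h2'⟩) <;> omega
          rw [h1, h2]
          exact ih (some (v, j)) hpw.2 (by
            intro q hq w k hwk
            cases hwk
            exact lt_trans hji (hpw.1 q hq))
    · have h1 : pvStepA (pvOut acc) (i, x) = pvOut acc := by
        simp only [pvStepA]; rw [if_neg hx]
      rw [if_neg hx, h1]
      exact ih acc hpw.2 (fun q hq => hlt q (by simp [hq]))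

-- ===== VERDICT (by name: the statement is the Claim_ definition above) =====
theorem first_min_spec : Claim_equal_first_min := by
  intro arr _
  unfold Spec_first_min
  have hfold : ∀ (l : List (Int × Int)),
      PySem.List.min2? l (fun q => q.1) (fun q => q.2) = l.foldl pvStepB none := by
    intro l
    unfold PySem.List.min2?
    congr 1
    funext acc q
    cases acc <;> simp [pvStepB]
  have hA : first_min arr = (PySem.List.enumerate arr).foldl pvStepA (pvOut none) := rfl
  have hB : first_min_alt arr
      = pvOut (((PySem.List.enumerate arr).filterMap
          (fun p => if PySem.Int.mod p.2 2 == 0 then some (p.2, p.1) else none)).foldl pvStepB none) := by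
    unfold first_min_alt
    simp only [hfold]
    cases hc : ((PySem.List.enumerate arr).filterMap
        (fun p => if PySem.Int.mod p.2 2 == 0 then some (p.2, p.1) else none)).foldl pvStepB none with
    | none => rfl
    | some q => rcases q with ⟨v, k⟩; rfl
  rw [hA, hB]
  exact pv_loop_eq (PySem.List.enumerate arr) none
    (PySem.List.pairwise_lt_enumerate arr 0) (by intro p _ v j h; cases h)
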